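-- pv_equiv track=rewrite | github.com/Ananikov-Lab/QM9 | cli_scripts/mining_pubchem/generate_templates.py | atom_numerate
-- ===== SOURCE A (Python) =====
-- def atom_numerate(list_smiles):
--     """Creating smiles with numbered atoms"""
--     list_numsmiles = []
--     for smiles in list_smiles:
--         numsmiles = ''
--         i = 1
--         for char in smiles:
--             if char == '*':
--                 numsmiles += f'[{char}:{i}]'
--                 i += 1
--             else:
--                 numsmiles += char
--         list_numsmiles += [numsmiles]
--     return list_numsmiles
-- ===== SOURCE B (Python) =====
-- def atom_numerate(list_smiles):
--     """Creating smiles with numbered atoms"""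
--     def number(smiles):
--         parts = smiles.split('*')
--         res = parts[0]
--         for i, seg in enumerate(parts[1:], start=1):
--             res += f'[*:{i}]' + seg
--         return res
--     return [number(smiles) for smiles in list_smiles]
-- ===== Notes on version B (the rewrite author's own statement) =====
-- stated objective: alternative
-- what changed: B splits each SMILES on '*' and rebuilds it by interleaving numbered '[*:i]' tags with the segments (outer list built by comprehension), instead of A's per-character scan with a running counter and string accumulator.
import Mathlib
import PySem

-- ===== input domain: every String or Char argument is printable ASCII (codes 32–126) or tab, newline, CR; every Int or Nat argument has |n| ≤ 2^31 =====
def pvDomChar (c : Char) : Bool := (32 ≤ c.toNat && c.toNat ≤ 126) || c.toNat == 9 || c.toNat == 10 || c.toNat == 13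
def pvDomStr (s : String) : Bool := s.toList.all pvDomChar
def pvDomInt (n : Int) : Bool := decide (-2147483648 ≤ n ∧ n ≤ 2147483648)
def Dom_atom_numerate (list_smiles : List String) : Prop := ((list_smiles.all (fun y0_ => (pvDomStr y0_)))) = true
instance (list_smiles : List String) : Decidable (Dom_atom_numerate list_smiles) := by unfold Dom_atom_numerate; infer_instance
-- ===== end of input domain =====

-- B rebuilds each string from its '*'-split segments instead of A's per-character scan; same cost, different decomposition (objective: alternative).

-- ===== PORT A =====
-- inner loop body of A: state = (numsmiles as chars, counter i)
def atomStepA (st : List Char × Int) (c : Char) : List Char × Int :=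
  if c = '*' then (st.1 ++ ('[' :: c :: ':' :: (PySem.Int.toChars st.2 ++ [']'])), st.2 + 1)
  else (st.1 ++ [c], st.2)

def atom_numerate (list_smiles : List String) : List String :=
  list_smiles.foldl
    (fun list_numsmiles smiles =>
      list_numsmiles ++ [String.ofList (smiles.toList.foldl atomStepA ([], 1)).1]) []

-- ===== PORT B =====
-- B's helper `number`: split on '*', rebuild interleaving numbered tags
def atomNumberB (smiles : String) : String :=
  match PySem.Chars.splitOn smiles.toList ['*'] with
  | [] => ""   -- unreachable: Python split never returns an empty list (totality guard)
  | p0 :: rest =>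
      String.ofList ((PySem.List.enumerate rest 1).foldl
        (fun res pr => res ++ ('[' :: '*' :: ':' :: (PySem.Int.toChars pr.1 ++ [']'])) ++ pr.2) p0)

def atom_numerate_alt (list_smiles : List String) : List String :=
  list_smiles.map atomNumberB

-- ===== PRECONDITION & SPEC =====
def Spec_atom_numerate (list_smiles : List String) (out : List String) : Prop := out = atom_numerate_alt list_smiles
instance (list_smiles : List String) (out : List String) : Decidable (Spec_atom_numerate list_smiles out) := by unfold Spec_atom_numerate; infer_instance

-- ===== CLAIM (what is proved, stated in full; the proofs are below) =====
def Claim_equal_atom_numerate : Prop := ∀ (list_smiles : List String), Dom_atom_numerate list_smiles → Spec_atom_numerate list_smiles (atom_numerate list_smiles)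

-- ===== LEMMAS AND PROOFS =====

-- structural characterisation of splitting a char list on '*'
def splitStar : List Char → List (List Char)
  | [] => [[]]
  | c :: cs =>
      if c = '*' then [] :: splitStar cs
      else match splitStar cs with
        | [] => [[c]]
        | p :: ps => (c :: p) :: ps

def consHead (x : List Char) : List (List Char) → List (List Char)
  | [] => [x]
  | p :: ps => (x ++ p) :: ps

theorem splitStar_ne_nil (cs : List Char) : splitStar cs ≠ [] := by
  cases cs with
  | nil => simp [splitStar]
  | cons c cs =>
    simp only [splitStar]
    split
    · simp
    · split <;> simp

theorem consHead_nil (l : List (List Char)) (h : l ≠ []) : consHead [] l = l := by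
  cases l with
  | nil => exact absurd rfl h
  | cons p ps => simp [consHead]

theorem go_star (fuel : Nat) : ∀ (l cur : List Char) (acc : List (List Char)),
    l.length < fuel →
    PySem.Chars.splitOn.go ['*'] fuel l cur acc = acc.reverse ++ consHead cur.reverse (splitStar l) := by
  induction fuel with
  | zero => intro l cur acc h; omega
  | succ f ih =>
    intro l cur acc h
    cases l with
    | nil => simp [PySem.Chars.splitOn.go, splitStar, consHead]
    | cons c rest =>
      by_cases hc : c = '*'
      · subst hc
        have hpre : List.isPrefixOf ['*'] ('*' :: rest) = true := by simp [List.isPrefixOf]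
        rw [show PySem.Chars.splitOn.go ['*'] (f+1) ('*' :: rest) cur acc
              = PySem.Chars.splitOn.go ['*'] f rest [] (cur.reverse :: acc) by
            simp [PySem.Chars.splitOn.go, hpre]]
        rw [ih rest [] (cur.reverse :: acc) (by simpa using h)]
        simp only [splitStar, List.reverse_cons, List.append_assoc, consHead]
        rcases hps : splitStar rest with _ | ⟨p, ps⟩
        · exact absurd hps (splitStar_ne_nil rest)
        · simp
      · have hpre : List.isPrefixOf ['*'] (c :: rest) = false := by
          simp [List.isPrefixOf, Ne.symm hc]
        rw [show PySem.Chars.splitOn.go ['*'] (f+1) (c :: rest) cur acc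
              = PySem.Chars.splitOn.go ['*'] f rest (c :: cur) acc by
            simp [PySem.Chars.splitOn.go, hpre]]
        rw [ih rest (c :: cur) acc (by simpa using h)]
        simp only [splitStar, if_neg hc, List.reverse_cons]
        rcases hps : splitStar rest with _ | ⟨p, ps⟩
        · exact absurd hps (splitStar_ne_nil rest)
        · simp [consHead]

theorem splitOn_eq_splitStar (cs : List Char) :
    PySem.Chars.splitOn cs ['*'] = splitStar cs := by
  rw [show PySem.Chars.splitOn cs ['*'] = PySem.Chars.splitOn.go ['*'] (cs.length + 1) cs [] [] from rfl]
  rw [go_star (cs.length + 1) cs [] [] (by omega)]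
  simp [consHead_nil _ (splitStar_ne_nil cs)]

-- B's rebuild as a function of the raw char list
def buildB (cs pre : List Char) (i : Int) : List Char :=
  match splitStar cs with
  | [] => pre
  | p0 :: rest =>
      (PySem.List.enumerate rest i).foldl
        (fun res pr => res ++ ('[' :: '*' :: ':' :: (PySem.Int.toChars pr.1 ++ [']'])) ++ pr.2) (pre ++ p0)

theorem buildB_nil (pre : List Char) (i : Int) : buildB [] pre i = pre := by
  simp [buildB, splitStar]

theorem buildB_star (cs pre : List Char) (i : Int) :
    buildB ('*' :: cs) pre i = buildB cs (pre ++ ('[' :: '*' :: ':' :: (PySem.Int.toChars i ++ [']']))) (i + 1) := by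
  simp only [buildB, splitStar, if_pos]
  rcases hps : splitStar cs with _ | ⟨p, ps⟩
  · exact absurd hps (splitStar_ne_nil cs)
  · simp [PySem.List.enumerate_cons]

theorem buildB_cons (c : Char) (hc : c ≠ '*') (cs pre : List Char) (i : Int) :
    buildB (c :: cs) pre i = buildB cs (pre ++ [c]) i := by
  simp only [buildB, splitStar, if_neg hc]
  rcases hps : splitStar cs with _ | ⟨p, ps⟩
  · exact absurd hps (splitStar_ne_nil cs)
  · simp

theorem foldl_eq_buildB (cs : List Char) : ∀ (pre : List Char) (i : Int),
    (cs.foldl atomStepA (pre, i)).1 = buildB cs pre i := by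
  induction cs with
  | nil => intro pre i; simp [buildB_nil]
  | cons c cs ih =>
    intro pre i
    by_cases hc : c = '*'
    · subst hc
      rw [List.foldl_cons, show atomStepA (pre, i) '*'
            = (pre ++ ('[' :: '*' :: ':' :: (PySem.Int.toChars i ++ [']'])), i + 1) by
          simp [atomStepA]]
      rw [ih, buildB_star]
    · rw [List.foldl_cons, show atomStepA (pre, i) c = (pre ++ [c], i) by simp [atomStepA, hc]]
      rw [ih, buildB_cons c hc]

theorem perString (s : String) :
    String.ofList (s.toList.foldl atomStepA ([], 1)).1 = atomNumberB s := by
  rw [foldl_eq_buildB]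
  unfold atomNumberB
  rw [splitOn_eq_splitStar]
  unfold buildB
  rcases hps : splitStar s.toList with _ | ⟨p, ps⟩
  · exact absurd hps (splitStar_ne_nil s.toList)
  · simp

-- ===== VERDICT (by name: the statement is the Claim_ definition above) =====
theorem atom_numerate_spec : Claim_equal_atom_numerate := by
  intro list_smiles _
  unfold Spec_atom_numerate atom_numerate atom_numerate_alt
  rw [PySem.List.foldl_append_singleton_eq_map]
  exact List.map_congr_left (fun s _ => perString s)
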